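-- pv_equiv track=rewrite | github.com/rishigupta2004/TelemetryX | ml/strategy.py | generate_strategy_permutations
-- ===== SOURCE A (Python) =====
-- from typing import Dict, List, Optional, Tuple
--
-- def generate_strategy_permutations(
--     total_laps: int,
--     compounds: List[str] = ["SOFT", "MEDIUM", "HARD"]
-- ) -> List[Tuple[List[str], List[int]]]:
--     strategies = []
--
--     for stops in range(0, 4):
--         if stops == 0:
--             strategies.append(([compounds[0]], []))
--         elif stops == 1:
--             for first in compounds:
--                 for second in compounds:
--                     pit_lap = total_laps // 2
--                     strategies.append(([first, second], [pit_lap]))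
--         elif stops == 2:
--             for first in compounds:
--                 for second in compounds:
--                     for third in compounds:
--                         pit1 = total_laps // 3
--                         pit2 = 2 * total_laps // 3
--                         strategies.append(([first, second, third], [pit1, pit2]))
--         else:
--             for first in compounds:
--                 for second in compounds:
--                     for third in compounds:
--                         for fourth in compounds:
--                             pit1 = total_laps // 4
--                             pit2 = 2 * total_laps // 4
--                             pit3 = 3 * total_laps // 4
--                             strategies.append(([first, second, third, fourth], [pit1, pit2, pit3]))
--
--     return strategies
-- ===== SOURCE B (Python) =====
-- from typing import Dict, List, Optional, Tuple
--
-- def generate_strategy_permutations(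
--     total_laps: int,
--     compounds: List[str] = ["SOFT", "MEDIUM", "HARD"]
-- ) -> List[Tuple[List[str], List[int]]]:
--     # Base-k index encoding: every compound sequence of length n is the
--     # base-k numeral of its rank; decode by repeated divmod (digits come out
--     # least-significant first, so reverse to get the slowest-varying slot first).
--     k = len(compounds)
--     strategies = [([compounds[0]], [])]
--     for stops in range(1, 4):
--         n = stops + 1
--         pits = [i * total_laps // n for i in range(1, n)]
--         for code in range(k ** n):
--             combo = []
--             c = code
--             for _ in range(n):
--                 c, d = divmod(c, k)
--                 combo.append(compounds[d])
--             combo.reverse()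
--             strategies.append((combo, list(pits)))
--     return strategies
-- ===== Notes on version B (the rewrite author's own statement) =====
-- stated objective: alternative
-- what changed: Replaces the four hardcoded nested-loop branches by a rank-based enumeration: each compound sequence of length n is decoded from its index in range(k**n) as a base-k numeral via repeated divmod, and the pit laps come from the single formula i*total_laps//n.
import Mathlib
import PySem

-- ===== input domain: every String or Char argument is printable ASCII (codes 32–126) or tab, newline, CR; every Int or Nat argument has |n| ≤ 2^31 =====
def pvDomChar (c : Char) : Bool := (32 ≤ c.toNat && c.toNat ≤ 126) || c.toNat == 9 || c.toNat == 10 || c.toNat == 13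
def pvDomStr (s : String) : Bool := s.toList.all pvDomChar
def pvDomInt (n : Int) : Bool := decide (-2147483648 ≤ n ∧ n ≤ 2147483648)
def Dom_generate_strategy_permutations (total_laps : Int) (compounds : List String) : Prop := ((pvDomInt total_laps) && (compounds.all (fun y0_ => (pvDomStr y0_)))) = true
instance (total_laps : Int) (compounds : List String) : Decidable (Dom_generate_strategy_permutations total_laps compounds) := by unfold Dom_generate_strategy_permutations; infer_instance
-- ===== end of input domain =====

-- B enumerates each length-n compound sequence by decoding its rank in range(k**n) as a
-- base-k numeral (repeated divmod), replacing A's four hardcoded nested-loop branches;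
-- objective: alternative. Equivalence is about the return value only.

-- ===== PORT A =====
-- A: four branches, nested 'for' loops appending to 'strategies'.
def generate_strategy_permutations (total_laps : Int) (compounds : List String) : List (List String × List Int) :=
  -- compounds[0] raises IndexError on empty compounds (excluded by Pre_); getD 0 is exact on Pre_.
  let s0 : List (List String × List Int) := [([compounds.getD 0 ""], [])]
  let s1 := compounds.foldl (fun acc first =>
    compounds.foldl (fun acc second =>
      acc ++ [([first, second], [PySem.Int.floordiv total_laps 2])]) acc) s0
  let s2 := compounds.foldl (fun acc first =>
    compounds.foldl (fun acc second =>
      compounds.foldl (fun acc third =>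
        acc ++ [([first, second, third],
          [PySem.Int.floordiv total_laps 3, PySem.Int.floordiv (2 * total_laps) 3])]) acc) acc) s1
  compounds.foldl (fun acc first =>
    compounds.foldl (fun acc second =>
      compounds.foldl (fun acc third =>
        compounds.foldl (fun acc fourth =>
          acc ++ [([first, second, third, fourth],
            [PySem.Int.floordiv total_laps 4, PySem.Int.floordiv (2 * total_laps) 4,
             PySem.Int.floordiv (3 * total_laps) 4])]) acc) acc) acc) s2

-- ===== PORT B =====
-- The inner 'for _ in range(n): c, d = divmod(c, k); combo.append(compounds[d])' loop,
-- as structural recursion on n (digits least-significant first; caller reverses).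
-- divmod on the nonnegative ints of range(k**n) is Nat division, exact here.
def pvDigits (compounds : List String) : Nat → Nat → List String
  | _, 0 => []
  | c, n + 1 => compounds.getD (c % compounds.length) "" :: pvDigits compounds (c / compounds.length) n

def generate_strategy_permutations_alt (total_laps : Int) (compounds : List String) : List (List String × List Int) :=
  let k := compounds.length
  (PySem.List.pyRange 1 4 1).foldl (fun strategies stops =>
    let n := (stops + 1).toNat
    let pits := (PySem.List.pyRange 1 (stops + 1) 1).map
      (fun i => PySem.Int.floordiv (i * total_laps) (stops + 1))
    -- range(k ** n) enumerates nonnegative ranks; List.range is exact for it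
    (List.range (k ^ n)).foldl (fun acc code =>
      acc ++ [((pvDigits compounds code n).reverse, pits)]) strategies)
    [([compounds.getD 0 ""], [])]

-- ===== PRECONDITION & SPEC =====
-- Pre_ excludes exactly the empty compounds list, on which A (and B) raise IndexError at compounds[0].
def Pre_generate_strategy_permutations (total_laps : Int) (compounds : List String) : Prop := compounds ≠ []
instance (total_laps : Int) (compounds : List String) : Decidable (Pre_generate_strategy_permutations total_laps compounds) := by unfold Pre_generate_strategy_permutations; infer_instance
def pvWitness_generate_strategy_permutations : Int × List String := (10, ["SOFT", "MEDIUM", "HARD"])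

def Spec_generate_strategy_permutations (total_laps : Int) (compounds : List String) (out : List (List String × List Int)) : Prop := out = generate_strategy_permutations_alt total_laps compounds
instance (total_laps : Int) (compounds : List String) (out : List (List String × List Int)) : Decidable (Spec_generate_strategy_permutations total_laps compounds out) := by unfold Spec_generate_strategy_permutations; infer_instance

-- ===== CLAIM =====
def Claim_equal_generate_strategy_permutations : Prop := ∀ (total_laps : Int) (compounds : List String), Dom_generate_strategy_permutations total_laps compounds → Pre_generate_strategy_permutations total_laps compounds → Spec_generate_strategy_permutations total_laps compounds (generate_strategy_permutations total_laps compounds)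

-- ===== LEMMAS AND PROOFS =====

-- Sequences of length n over cs, last slot varying fastest (= lexicographic, slowest first).
def pvSnocProd (cs : List String) : Nat → List (List String)
  | 0 => [[]]
  | n + 1 => (pvSnocProd cs n).flatMap (fun s => cs.map (fun x => s ++ [x]))

theorem pvGetD_range (cs : List String) :
    (List.range cs.length).map (fun r => cs.getD r "") = cs := by
  apply List.ext_getElem
  · simp
  · intro i h1 h2; simp [List.getD_eq_getElem?_getD, List.getElem?_eq_getElem h2]

theorem pvRange_mul_map {α : Type} (a k : Nat) (f : Nat → α) :
    (List.range (a * k)).map f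
      = (List.range a).flatMap (fun q => (List.range k).map (fun r => f (q * k + r))) := by
  induction a with
  | zero => simp
  | succ a ih =>
    rw [Nat.succ_mul, List.range_add, List.map_append, ih, List.range_succ]
    simp [List.map_map, Function.comp_def]

theorem pvDecode_range (cs : List String) (h : cs ≠ []) (n : Nat) :
    (List.range (cs.length ^ n)).map (fun c => (pvDigits cs c n).reverse) = pvSnocProd cs n := by
  have hk : 0 < cs.length := List.length_pos_iff.mpr h
  induction n with
  | zero => simp [pvDigits, pvSnocProd]
  | succ n ih =>
    rw [pow_succ, pvRange_mul_map]
    show _ = (pvSnocProd cs n).flatMap _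
    rw [← ih, List.flatMap_map]
    apply List.flatMap_congr
    intro q _
    have step : ∀ r ∈ List.range cs.length,
        (pvDigits cs (q * cs.length + r) (n + 1)).reverse
          = (pvDigits cs q n).reverse ++ [cs.getD r ""] := by
      intro r hr
      rw [List.mem_range] at hr
      simp [pvDigits, Nat.mul_comm q cs.length, Nat.mul_add_div hk, Nat.mod_eq_of_lt hr, Nat.div_eq_of_lt hr]
    rw [List.map_congr_left step,
      show (fun r => (pvDigits cs q n).reverse ++ [cs.getD r ""])
          = (fun x => (pvDigits cs q n).reverse ++ [x]) ∘ (fun r => cs.getD r "") from rfl,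
      ← List.map_map, pvGetD_range]

theorem pvFlatMap_single {α β : Type} (l : List α) (f : α → β) :
    l.flatMap (fun x => [f x]) = l.map f := by
  induction l with
  | nil => rfl
  | cons a l ih => simp [List.flatMap_cons, ih]

theorem pvSnoc_two {α : Type} (cs : List String) (f : List String → α) :
    (pvSnocProd cs 2).map f = cs.flatMap (fun x => cs.flatMap (fun y => [f [x, y]])) := by
  simp [pvSnocProd, List.map_flatMap, List.flatMap_map, pvFlatMap_single, Function.comp_def]

theorem pvSnoc_three {α : Type} (cs : List String) (f : List String → α) :
    (pvSnocProd cs 3).map f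
      = cs.flatMap (fun x => cs.flatMap (fun y => cs.flatMap (fun z => [f [x, y, z]]))) := by
  simp [pvSnocProd, List.map_flatMap, List.flatMap_map, pvFlatMap_single, Function.comp_def, List.flatMap_assoc]

theorem pvSnoc_four {α : Type} (cs : List String) (f : List String → α) :
    (pvSnocProd cs 4).map f
      = cs.flatMap (fun x => cs.flatMap (fun y => cs.flatMap (fun z =>
          cs.flatMap (fun w => [f [x, y, z, w]])))) := by
  simp [pvSnocProd, List.map_flatMap, List.flatMap_map, pvFlatMap_single, Function.comp_def, List.flatMap_assoc]

theorem pvMapPair {α : Type} (m : Nat) (g : Nat → List String) (p : α) :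
    (List.range m).map (fun c => (g c, p)) = ((List.range m).map g).map (fun s => (s, p)) := by
  rw [List.map_map]; rfl

-- ===== VERDICT =====
theorem generate_strategy_permutations_spec : Claim_equal_generate_strategy_permutations := by
  intro total_laps cs _ h
  unfold Spec_generate_strategy_permutations generate_strategy_permutations
    generate_strategy_permutations_alt
  rw [show PySem.List.pyRange 1 4 1 = [1, 2, 3] from rfl]
  simp only [List.foldl_cons, List.foldl_nil]
  rw [show ((1:Int)+1).toNat = 2 from rfl, show ((2:Int)+1).toNat = 3 from rfl,
      show ((3:Int)+1).toNat = 4 from rfl,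
      show PySem.List.pyRange 1 ((1:Int)+1) 1 = [1] from rfl,
      show PySem.List.pyRange 1 ((2:Int)+1) 1 = [1, 2] from rfl,
      show PySem.List.pyRange 1 ((3:Int)+1) 1 = [1, 2, 3] from rfl]
  simp only [PySem.List.foldl_append_singleton_eq_map, List.map_cons, List.map_nil]
  rw [pvMapPair, pvMapPair, pvMapPair, pvDecode_range cs h, pvDecode_range cs h,
      pvDecode_range cs h, pvSnoc_two, pvSnoc_three, pvSnoc_four]
  simp only [PySem.List.foldl_append_eq_flatMap, pvFlatMap_single]
  norm_num
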